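-- pv_equiv track=rewrite | github.com/chuntaojun/leetcode | math/medium/Spiral_Matrix_III.py | draw_guiji
-- ===== SOURCE A (Python) =====
-- def draw_guiji(r, c, lateral, vertical, dir_type, R, C):
--     road = []
--     if vertical is None:
--         for item in range(1, lateral + 1):
--             c += dir_type * 1
--             if r >= R or r < 0 or c >= C or c < 0:
--                 continue
--             road.append([r, c])
--     if lateral is None:
--         for item in range(1, vertical + 1):
--             r += dir_type * 1
--             if r >= R or r < 0 or c >= C or c < 0:
--                 continue
--             road.append([r, c])
--     return road, r, c
-- ===== SOURCE B (Python) =====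
-- def _valid_steps(q, d, k, Q):
--     """Step indices i in [1, k] with 0 <= q + d*i < Q, in increasing order."""
--     if k < 1 or Q <= 0:
--         return []
--     if d == 0:
--         return list(range(1, k + 1)) if 0 <= q < Q else []
--     if d > 0:
--         lo = max(1, -(q // d))
--         hi = min(k, (Q - 1 - q) // d)
--     else:
--         e = -d
--         lo = max(1, -((Q - 1 - q) // e))
--         hi = min(k, q // e)
--     return list(range(lo, hi + 1))
--
--
-- def draw_guiji(r, c, lateral, vertical, dir_type, R, C):
--     # Closed-form: intersect the moved interval with the grid bounds; O(valid cells).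
--     if vertical is None:
--         road = []
--         if 0 <= r < R:
--             road = [[r, c + dir_type * i] for i in _valid_steps(c, dir_type, lateral, C)]
--         if lateral > 0:
--             c += dir_type * lateral
--         return road, r, c
--     if lateral is None:
--         road = []
--         if 0 <= c < C:
--             road = [[r + dir_type * i, c] for i in _valid_steps(r, dir_type, vertical, R)]
--         if vertical > 0:
--             r += dir_type * vertical
--         return road, r, c
--     return [], r, c
-- ===== Notes on version B (the rewrite author's own statement) =====
-- stated objective: faster
-- what changed: B replaces A's per-step walk (one loop iteration per step, testing bounds each time) with a closed-form end position and an integer-division intersection of the moved interval with the grid bounds, emitting only the valid cells.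
import Mathlib
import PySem

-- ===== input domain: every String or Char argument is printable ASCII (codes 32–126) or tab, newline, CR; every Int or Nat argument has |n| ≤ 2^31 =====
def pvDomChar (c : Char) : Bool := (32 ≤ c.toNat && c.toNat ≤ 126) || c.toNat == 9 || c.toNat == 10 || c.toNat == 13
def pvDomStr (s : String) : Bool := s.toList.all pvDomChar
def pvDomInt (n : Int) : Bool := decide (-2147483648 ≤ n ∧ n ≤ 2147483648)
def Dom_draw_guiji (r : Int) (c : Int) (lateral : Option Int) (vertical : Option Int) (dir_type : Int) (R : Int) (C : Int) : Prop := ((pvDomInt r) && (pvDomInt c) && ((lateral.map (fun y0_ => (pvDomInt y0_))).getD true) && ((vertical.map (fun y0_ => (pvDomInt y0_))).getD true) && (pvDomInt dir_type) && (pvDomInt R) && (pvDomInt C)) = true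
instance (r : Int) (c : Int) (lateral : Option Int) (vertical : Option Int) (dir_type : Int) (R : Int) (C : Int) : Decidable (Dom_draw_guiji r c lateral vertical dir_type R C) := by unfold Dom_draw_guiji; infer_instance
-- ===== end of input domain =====

-- B computes the end position in closed form and emits only the in-bounds cells by
-- intersecting the moved step interval with the grid bounds (objective: faster, O(valid cells)).

-- ===== PORT A =====
-- Literal port of A: walk step by step, appending each in-bounds cell.
-- When both lateral and vertical are None, Python raises TypeError (None + 1);
-- those inputs are excluded by Pre_, so 'lateral.getD 0' / 'vertical.getD 0' is never the
-- value Python computes on an admitted input.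
def draw_guiji (r : Int) (c : Int) (lateral : Option Int) (vertical : Option Int) (dir_type : Int) (R : Int) (C : Int) : List (List Int) × Int × Int :=
  let road : List (List Int) := []
  let s1 : List (List Int) × Int :=
    if vertical = none then
      (PySem.List.pyRange 1 (lateral.getD 0 + 1) 1).foldl
        (fun st _item =>
          let c' := st.2 + dir_type * 1
          if r ≥ R ∨ r < 0 ∨ c' ≥ C ∨ c' < 0 then (st.1, c')
          else (st.1 ++ [[r, c']], c')) (road, c)
    else (road, c)
  let road := s1.1
  let c := s1.2
  let s2 : List (List Int) × Int :=
    if lateral = none then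
      (PySem.List.pyRange 1 (vertical.getD 0 + 1) 1).foldl
        (fun st _item =>
          let r' := st.2 + dir_type * 1
          if r' ≥ R ∨ r' < 0 ∨ c ≥ C ∨ c < 0 then (st.1, r')
          else (st.1 ++ [[r', c]], r')) (road, r)
    else (road, r)
  (s2.1, s2.2, c)

-- ===== PORT B =====
-- Step indices i in [1, k] with 0 ≤ q + d*i < Q, increasing (port of _valid_steps in Source B).
def validSteps (q : Int) (d : Int) (k : Int) (Q : Int) : List Int :=
  if k < 1 ∨ Q ≤ 0 then []
  else if d = 0 then
    (if 0 ≤ q ∧ q < Q then PySem.List.pyRange 1 (k + 1) 1 else [])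
  else if d > 0 then
    let lo := max 1 (-(PySem.Int.floordiv q d))
    let hi := min k (PySem.Int.floordiv (Q - 1 - q) d)
    PySem.List.pyRange lo (hi + 1) 1
  else
    let e := -d
    let lo := max 1 (-(PySem.Int.floordiv (Q - 1 - q) e))
    let hi := min k (PySem.Int.floordiv q e)
    PySem.List.pyRange lo (hi + 1) 1

def draw_guiji_alt (r : Int) (c : Int) (lateral : Option Int) (vertical : Option Int) (dir_type : Int) (R : Int) (C : Int) : List (List Int) × Int × Int :=
  match vertical with
  | none =>
      let k := lateral.getD 0
      let road := if 0 ≤ r ∧ r < R then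
          (validSteps c dir_type k C).map (fun i => [r, c + dir_type * i]) else []
      let c' := if k > 0 then c + dir_type * k else c
      (road, r, c')
  | some m =>
      match lateral with
      | none =>
          let road := if 0 ≤ c ∧ c < C then
              (validSteps r dir_type m R).map (fun i => [r + dir_type * i, c]) else []
          let r' := if m > 0 then r + dir_type * m else r
          (road, r', c)
      | some _ => ([], r, c)

-- ===== PRECONDITION & SPEC =====
-- Pre_ excludes only the inputs where both lateral and vertical are None, on which A
-- raises TypeError (None + 1); B raises there too.
def Pre_draw_guiji (r : Int) (c : Int) (lateral : Option Int) (vertical : Option Int) (dir_type : Int) (R : Int) (C : Int) : Prop :=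
  ¬(lateral = none ∧ vertical = none)
instance (r : Int) (c : Int) (lateral : Option Int) (vertical : Option Int) (dir_type : Int) (R : Int) (C : Int) : Decidable (Pre_draw_guiji r c lateral vertical dir_type R C) := by unfold Pre_draw_guiji; infer_instance

def pvWitness_draw_guiji : Int × Int × Option Int × Option Int × Int × Int × Int :=
  (0, 0, some 4, none, 1, 3, 3)

def Spec_draw_guiji (r : Int) (c : Int) (lateral : Option Int) (vertical : Option Int) (dir_type : Int) (R : Int) (C : Int) (out : List (List Int) × Int × Int) : Prop := out = draw_guiji_alt r c lateral vertical dir_type R C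
instance (r : Int) (c : Int) (lateral : Option Int) (vertical : Option Int) (dir_type : Int) (R : Int) (C : Int) (out : List (List Int) × Int × Int) : Decidable (Spec_draw_guiji r c lateral vertical dir_type R C out) := by unfold Spec_draw_guiji; infer_instance

-- ===== CLAIM (what is proved, stated in full; the proofs are below) =====
def Claim_equal_draw_guiji : Prop := ∀ (r : Int) (c : Int) (lateral : Option Int) (vertical : Option Int) (dir_type : Int) (R : Int) (C : Int), Dom_draw_guiji r c lateral vertical dir_type R C → Pre_draw_guiji r c lateral vertical dir_type R C → Spec_draw_guiji r c lateral vertical dir_type R C (draw_guiji r c lateral vertical dir_type R C)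

-- ===== LEMMAS AND PROOFS =====

-- the cells emitted by one of A's walks, as a recursion on the remaining step count
def cellsW (d : Int) (ok : Int → Bool) (mk : Int → List Int) : Nat → Int → List (List Int)
  | 0, _ => []
  | n + 1, q => (if ok (q + d) then [mk (q + d)] else []) ++ cellsW d ok mk n (q + d)

-- A's fold = prefix ++ cells, with the end coordinate in closed form
theorem foldl_walk (d : Int) (P : Int → Prop) [DecidablePred P] (mk : Int → List Int) :
    ∀ (L : List Int) (road : List (List Int)) (q : Int),
      L.foldl (fun st _item =>
          if P (st.2 + d * 1) then (st.1, st.2 + d * 1)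
          else (st.1 ++ [mk (st.2 + d * 1)], st.2 + d * 1)) (road, q)
        = (road ++ cellsW d (fun x => !decide (P x)) mk L.length q, q + d * L.length) := by
  intro L
  induction L with
  | nil => intro road q; simp [cellsW]
  | cons x t ih =>
    intro road q
    simp only [mul_one] at ih ⊢
    simp only [List.foldl_cons, List.length_cons]
    by_cases h : P (q + d)
    · rw [if_pos h, ih]
      have hc : cellsW d (fun x => !decide (P x)) mk (t.length + 1) q
          = cellsW d (fun x => !decide (P x)) mk t.length (q + d) := by
        simp [cellsW, h]
      rw [hc]
      simp only [Prod.mk.injEq]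
      exact ⟨by trivial, by push_cast; ring⟩
    · rw [if_neg h, ih]
      have hc : cellsW d (fun x => !decide (P x)) mk (t.length + 1) q
          = mk (q + d) :: cellsW d (fun x => !decide (P x)) mk t.length (q + d) := by
        simp [cellsW, h]
      rw [hc]
      simp only [Prod.mk.injEq]
      exact ⟨by simp, by push_cast; ring⟩

-- cellsW as a filterMap over the step indices 1..n
theorem cellsW_eq (d : Int) (ok : Int → Bool) (mk : Int → List Int) :
    ∀ (n : Nat) (q : Int),
      cellsW d ok mk n q
        = ((List.range n).map (fun (j : Nat) => ((j : Int) + 1))).filterMap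
            (fun i => if ok (q + d * i) then some (mk (q + d * i)) else none) := by
  intro n
  induction n with
  | zero => intro q; simp [cellsW]
  | succ n ih =>
    intro q
    have htail : ((List.range n).map ((fun (j : Nat) => ((j : Int) + 1)) ∘ Nat.succ)).filterMap
          (fun i => if ok (q + d * i) then some (mk (q + d * i)) else none)
        = cellsW d ok mk n (q + d) := by
      rw [ih (q + d)]
      rw [List.filterMap_map, List.filterMap_map]
      apply List.filterMap_congr
      intro j _
      simp only [Function.comp_apply, Nat.succ_eq_add_one, Nat.cast_add, Nat.cast_one]
      have e1 : q + d * ((j : Int) + 1 + 1) = q + d + d * ((j : Int) + 1) := by ring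
      rw [e1]
    rw [List.range_succ_eq_map, List.map_cons, List.map_map, List.filterMap_cons, htail]
    simp only [Nat.cast_zero, zero_add, mul_one]
    by_cases h : ok (q + d) <;> simp [cellsW, h]

theorem filterMap_if_eq_map_filter {α β : Type} (p : α → Bool) (f : α → β) :
    ∀ (l : List α),
      l.filterMap (fun x => if p x then some (f x) else none) = (l.filter p).map f := by
  intro l
  induction l with
  | nil => simp
  | cons x t ih =>
    by_cases h : p x <;> simp [h, ih]

theorem range_map_eq_pyRange (n : Nat) :
    (List.range n).map (fun (j : Nat) => ((j : Int) + 1))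
      = PySem.List.pyRange 1 ((n : Int) + 1) 1 := by
  rw [PySem.List.pyRange_one]
  have h : ((n : Int) + 1 - 1).toNat = n := by omega
  rw [h]
  apply List.map_congr_left
  intro j _
  omega

-- the key interval lemma: filtering consecutive integers by an interval yields a sub-range
theorem filter_pyRange_interval (a b lo hi : Int) :
    (PySem.List.pyRange a b 1).filter (fun i => decide (lo ≤ i ∧ i ≤ hi))
      = PySem.List.pyRange (max a lo) (min (b - 1) hi + 1) 1 := by
  have h1 : ((PySem.List.pyRange a b 1).filter (fun i => decide (lo ≤ i ∧ i ≤ hi))).Pairwise (· < ·) :=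
    List.Pairwise.sublist List.filter_sublist (PySem.List.pairwise_lt_pyRange_one a b)
  have h2 : (PySem.List.pyRange (max a lo) (min (b - 1) hi + 1) 1).Pairwise (· < ·) :=
    PySem.List.pairwise_lt_pyRange_one _ _
  have hperm : ((PySem.List.pyRange a b 1).filter (fun i => decide (lo ≤ i ∧ i ≤ hi))).Perm
      (PySem.List.pyRange (max a lo) (min (b - 1) hi + 1) 1) := by
    rw [List.perm_ext_iff_of_nodup (h1.imp fun h => ne_of_lt h) (h2.imp fun h => ne_of_lt h)]
    intro x
    simp only [List.mem_filter, PySem.List.mem_pyRange_one, decide_eq_true_eq]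
    omega
  exact hperm.eq_of_pairwise (fun a b _ _ hab hba => le_antisymm hab hba)
    (h1.imp fun h => le_of_lt h) (h2.imp fun h => le_of_lt h)

-- the bounds test as an interval condition in the step index
theorem bounds_iff_interval (q d Q i : Int) (hd : 0 < d) :
    (0 ≤ q + d * i ∧ q + d * i < Q)
      ↔ (-(PySem.Int.floordiv q d) ≤ i ∧ i ≤ PySem.Int.floordiv (Q - 1 - q) d) := by
  have h1 : -(PySem.Int.floordiv q d) ≤ i ↔ 0 ≤ q + d * i := by
    rw [neg_le, PySem.Int.le_floordiv_iff_mul_le hd]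
    constructor <;> intro h <;> nlinarith
  have h2 : i ≤ PySem.Int.floordiv (Q - 1 - q) d ↔ q + d * i < Q := by
    rw [PySem.Int.le_floordiv_iff_mul_le hd]
    constructor <;> intro h <;> nlinarith
  rw [h1, h2]

theorem bounds_iff_interval_neg (q d Q i : Int) (hd : d < 0) :
    (0 ≤ q + d * i ∧ q + d * i < Q)
      ↔ (-(PySem.Int.floordiv (Q - 1 - q) (-d)) ≤ i ∧ i ≤ PySem.Int.floordiv q (-d)) := by
  have he : (0 : Int) < -d := by omega
  have h1 : -(PySem.Int.floordiv (Q - 1 - q) (-d)) ≤ i ↔ q + d * i < Q := by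
    rw [neg_le, PySem.Int.le_floordiv_iff_mul_le he]
    constructor <;> intro h <;> nlinarith
  have h2 : i ≤ PySem.Int.floordiv q (-d) ↔ 0 ≤ q + d * i := by
    rw [PySem.Int.le_floordiv_iff_mul_le he]
    constructor <;> intro h <;> nlinarith
  rw [h1, h2]
  exact and_comm

theorem cellsW_false (d : Int) (ok : Int → Bool) (mk : Int → List Int)
    (hok : ∀ x, ok x = false) : ∀ (n : Nat) (q : Int), cellsW d ok mk n q = [] := by
  intro n
  induction n with
  | zero => intro q; simp [cellsW]
  | succ n ih => intro q; simp [cellsW, hok, ih]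

-- one whole walk of A equals B's closed-form emission
theorem walk_eq_valid (q d k Q : Int) (okF : Bool) (mk : Int → List Int) :
    cellsW d (fun x => okF && decide (0 ≤ x) && decide (x < Q)) mk k.toNat q
      = if okF then (validSteps q d k Q).map (fun i => mk (q + d * i)) else [] := by
  cases okF with
  | false =>
    simp only [Bool.false_and, Bool.false_eq_true, if_false]
    exact cellsW_false d _ mk (fun x => rfl) k.toNat q
  | true =>
    simp only [Bool.true_and, if_true]
    rw [cellsW_eq]
    rw [filterMap_if_eq_map_filter (fun i => decide (0 ≤ q + d * i) && decide (q + d * i < Q))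
      (fun i => mk (q + d * i))]
    by_cases hk : k < 1
    · have h0 : k.toNat = 0 := by omega
      simp [h0, validSteps, hk]
    · by_cases hQ : Q ≤ 0
      · rw [List.filter_eq_nil_iff.mpr ?_, List.map_nil]
        · simp [validSteps, hQ]
        · intro i _
          simp only [Bool.and_eq_true, decide_eq_true_eq, not_and]
          intro h1 h2; omega
      · have hkk : ((k.toNat : Int)) = k := Int.toNat_of_nonneg (by omega)
        rw [range_map_eq_pyRange, hkk]
        rcases lt_trichotomy d 0 with hd | hd | hd
        · -- d < 0
          rw [List.filter_congr (l := PySem.List.pyRange 1 (k + 1) 1) (q := fun i =>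
              decide (-(PySem.Int.floordiv (Q - 1 - q) (-d)) ≤ i ∧ i ≤ PySem.Int.floordiv q (-d))) ?_]
          · rw [filter_pyRange_interval]
            have e1 : k + 1 - 1 = k := by ring
            rw [e1]
            have hd0 : ¬ d = 0 := by omega
            have hdp : ¬ d > 0 := by omega
            simp [validSteps, hk, hQ, hd0, hdp]
          · intro i _
            rw [Bool.eq_iff_iff]
            simp only [Bool.and_eq_true, decide_eq_true_eq]
            exact bounds_iff_interval_neg q d Q i hd
        · -- d = 0
          subst hd
          by_cases hq : 0 ≤ q ∧ q < Q
          · rw [List.filter_eq_self.mpr ?_]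
            · simp [validSteps, hk, hQ, hq]
            · intro i _
              simp only [Bool.and_eq_true, decide_eq_true_eq]
              constructor <;> omega
          · rw [List.filter_eq_nil_iff.mpr ?_, List.map_nil]
            · simp [validSteps, hk, hQ, hq]
            · intro i _
              simp only [Bool.and_eq_true, decide_eq_true_eq, not_and]
              intro h1 h2
              omega
        · -- d > 0
          rw [List.filter_congr (l := PySem.List.pyRange 1 (k + 1) 1) (q := fun i =>
              decide (-(PySem.Int.floordiv q d) ≤ i ∧ i ≤ PySem.Int.floordiv (Q - 1 - q) d)) ?_]
          · rw [filter_pyRange_interval]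
            have e1 : k + 1 - 1 = k := by ring
            rw [e1]
            have hd0 : ¬ d = 0 := by omega
            simp [validSteps, hk, hQ, hd0, hd]
          · intro i _
            rw [Bool.eq_iff_iff]
            simp only [Bool.and_eq_true, decide_eq_true_eq]
            exact bounds_iff_interval q d Q i hd

-- boolean reshaping of A's bounds test (horizontal walk)
theorem ok_eq_h (r R C : Int) :
    (fun x : Int => !decide (r ≥ R ∨ r < 0 ∨ x ≥ C ∨ x < 0))
      = (fun x => decide (0 ≤ r ∧ r < R) && decide (0 ≤ x) && decide (x < C)) := by
  funext x
  rw [Bool.eq_iff_iff]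
  simp only [Bool.not_eq_true', Bool.and_eq_true, decide_eq_true_eq, decide_eq_false_iff_not]
  omega

-- boolean reshaping of A's bounds test (vertical walk)
theorem ok_eq_v (c R C : Int) :
    (fun x : Int => !decide (x ≥ R ∨ x < 0 ∨ c ≥ C ∨ c < 0))
      = (fun x => decide (0 ≤ c ∧ c < C) && decide (0 ≤ x) && decide (x < R)) := by
  funext x
  rw [Bool.eq_iff_iff]
  simp only [Bool.not_eq_true', Bool.and_eq_true, decide_eq_true_eq, decide_eq_false_iff_not]
  omega

theorem end_coord (q d k : Int) :
    q + d * ((k.toNat : Int)) = if k > 0 then q + d * k else q := by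
  by_cases hk : k > 0
  · rw [if_pos hk, Int.toNat_of_nonneg (by omega)]
  · rw [if_neg hk]
    have h0 : k.toNat = 0 := by omega
    rw [h0]
    simp

theorem branch_h (r c k dir_type R C : Int) :
    draw_guiji r c (some k) none dir_type R C = draw_guiji_alt r c (some k) none dir_type R C := by
  simp only [draw_guiji, draw_guiji_alt, Option.getD_some, reduceCtorEq, eq_self_iff_true,
    if_true, if_false]
  rw [foldl_walk dir_type (fun x => r ≥ R ∨ r < 0 ∨ x ≥ C ∨ x < 0) (fun x => [r, x])]
  simp only [List.nil_append, PySem.List.length_pyRange_one]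
  have e1 : (k + 1 - 1).toNat = k.toNat := by omega
  rw [e1, ok_eq_h, walk_eq_valid c dir_type k C (decide (0 ≤ r ∧ r < R)) (fun x => [r, x]),
    end_coord c dir_type k]
  by_cases hr : 0 ≤ r ∧ r < R
  · simp [hr]
  · simp [hr]

theorem branch_v (r c m dir_type R C : Int) :
    draw_guiji r c none (some m) dir_type R C = draw_guiji_alt r c none (some m) dir_type R C := by
  simp only [draw_guiji, draw_guiji_alt, Option.getD_some, reduceCtorEq, eq_self_iff_true,
    if_true, if_false]
  rw [foldl_walk dir_type (fun x => x ≥ R ∨ x < 0 ∨ c ≥ C ∨ c < 0) (fun x => [x, c])]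
  simp only [List.nil_append, PySem.List.length_pyRange_one]
  have e1 : (m + 1 - 1).toNat = m.toNat := by omega
  rw [e1, ok_eq_v, walk_eq_valid r dir_type m R (decide (0 ≤ c ∧ c < C)) (fun x => [x, c]),
    end_coord r dir_type m]
  by_cases hc : 0 ≤ c ∧ c < C
  · simp [hc]
  · simp [hc]

theorem branch_both (r c k m dir_type R C : Int) :
    draw_guiji r c (some k) (some m) dir_type R C = draw_guiji_alt r c (some k) (some m) dir_type R C := by
  simp [draw_guiji, draw_guiji_alt]

-- ===== VERDICT (by name: the statement is the Claim_ definition above) =====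
theorem draw_guiji_spec : Claim_equal_draw_guiji := by
  intro r c lateral vertical dir_type R C _hdom hpre
  unfold Spec_draw_guiji
  cases vertical with
  | none =>
    cases lateral with
    | none => exact absurd ⟨rfl, rfl⟩ hpre
    | some k => exact branch_h r c k dir_type R C
  | some m =>
    cases lateral with
    | none => exact branch_v r c m dir_type R C
    | some k => exact branch_both r c k m dir_type R C
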